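-- pv_equiv track=rewrite | github.com/zhf-0/graph | TestMemory/CalMem.py | MLPInfo
-- ===== SOURCE A (Python) =====
-- def MLPInfo(in_size, out_size, n_hidden, hidden_size):
--     count = in_size * hidden_size + hidden_size
--     intermid = hidden_size
--
--     for _ in range(n_hidden - 1):
--         count += hidden_size * hidden_size + hidden_size
--         intermid += hidden_size
--
--     count += hidden_size * out_size + out_size
--     intermid += out_size
--
--     return count, intermid
-- ===== SOURCE B (Python) =====
-- def MLPInfo(in_size, out_size, n_hidden, hidden_size):
--     k = max(n_hidden - 1, 0)
--     count = (in_size * hidden_size + hidden_size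
--              + k * (hidden_size * hidden_size + hidden_size)
--              + hidden_size * out_size + out_size)
--     intermid = hidden_size + k * hidden_size + out_size
--     return count, intermid
-- ===== Notes on version B (the rewrite author's own statement) =====
-- stated objective: faster
-- what changed: Replaced the per-hidden-layer loop by closed-form arithmetic: the constant per-layer increments are multiplied by max(n_hidden-1, 0).
import Mathlib
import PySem

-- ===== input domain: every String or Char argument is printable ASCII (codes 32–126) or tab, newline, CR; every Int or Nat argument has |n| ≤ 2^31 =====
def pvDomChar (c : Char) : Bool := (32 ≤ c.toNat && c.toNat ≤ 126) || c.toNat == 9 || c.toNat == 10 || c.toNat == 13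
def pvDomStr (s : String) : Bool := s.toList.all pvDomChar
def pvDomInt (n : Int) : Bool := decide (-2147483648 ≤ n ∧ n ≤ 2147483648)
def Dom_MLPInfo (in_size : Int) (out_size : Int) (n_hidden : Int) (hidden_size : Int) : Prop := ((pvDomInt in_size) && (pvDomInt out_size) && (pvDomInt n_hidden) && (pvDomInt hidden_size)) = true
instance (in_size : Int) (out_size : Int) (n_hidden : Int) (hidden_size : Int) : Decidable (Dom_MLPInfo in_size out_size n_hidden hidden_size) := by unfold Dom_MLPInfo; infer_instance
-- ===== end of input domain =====

-- B replaces A's per-hidden-layer loop by closed-form arithmetic (multiply the constant per-layer increments by max(n_hidden-1,0)); objective: faster.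

-- ===== PORT A =====
-- the for-loop over range(n_hidden - 1), carrying (count, intermid)
def MLPInfoLoop (hidden_size : Int) : Nat → Int → Int → Int × Int
  | 0, count, intermid => (count, intermid)
  | k + 1, count, intermid =>
      MLPInfoLoop hidden_size k (count + hidden_size * hidden_size + hidden_size) (intermid + hidden_size)

def MLPInfo (in_size : Int) (out_size : Int) (n_hidden : Int) (hidden_size : Int) : List Int :=
  let count := in_size * hidden_size + hidden_size
  let intermid := hidden_size
  let r := MLPInfoLoop hidden_size (n_hidden - 1).toNat count intermid
  [r.1 + hidden_size * out_size + out_size, r.2 + out_size]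

-- ===== PORT B =====
def MLPInfo_alt (in_size : Int) (out_size : Int) (n_hidden : Int) (hidden_size : Int) : List Int :=
  let k := max (n_hidden - 1) 0
  [in_size * hidden_size + hidden_size
     + k * (hidden_size * hidden_size + hidden_size)
     + hidden_size * out_size + out_size,
   hidden_size + k * hidden_size + out_size]

-- ===== PRECONDITION & SPEC =====
def Spec_MLPInfo (in_size : Int) (out_size : Int) (n_hidden : Int) (hidden_size : Int) (out : List Int) : Prop := out = MLPInfo_alt in_size out_size n_hidden hidden_size
instance (in_size : Int) (out_size : Int) (n_hidden : Int) (hidden_size : Int) (out : List Int) : Decidable (Spec_MLPInfo in_size out_size n_hidden hidden_size out) := by unfold Spec_MLPInfo; infer_instance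

-- ===== CLAIM (what is proved, stated in full; the proofs are below) =====
def Claim_equal_MLPInfo : Prop := ∀ (in_size : Int) (out_size : Int) (n_hidden : Int) (hidden_size : Int), Dom_MLPInfo in_size out_size n_hidden hidden_size → Spec_MLPInfo in_size out_size n_hidden hidden_size (MLPInfo in_size out_size n_hidden hidden_size)

-- ===== LEMMAS AND PROOFS =====
theorem MLPInfoLoop_closed (h : Int) (k : Nat) (c i : Int) :
    MLPInfoLoop h k c i = (c + (k : Int) * (h * h + h), i + (k : Int) * h) := by
  induction k generalizing c i with
  | zero => simp [MLPInfoLoop]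
  | succ n ih =>
      rw [MLPInfoLoop, ih]
      push_cast
      refine Prod.ext ?_ ?_ <;> simp <;> ring

-- ===== VERDICT (by name: the statement is the Claim_ definition above) =====
theorem MLPInfo_spec : Claim_equal_MLPInfo := by
  intro in_size out_size n_hidden hidden_size _
  unfold Spec_MLPInfo MLPInfo MLPInfo_alt
  simp only [MLPInfoLoop_closed, Int.toNat_eq_max]
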